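-- pv_equiv track=rewrite | github.com/1s0m0rph/CryptoTools | crypto_tools/util_upper.py | ascii_to_nums_nomod
-- ===== SOURCE A (Python) =====
-- def ascii_to_nums_nomod(s,s_block_width):
-- 	i_block_width = 3  #technically floor(log10(256))+1 but that's just 3
-- 	m_nums = []
-- 	for chsq in [s[i:i+s_block_width] for i in range(0, len(s), s_block_width)]:
-- 		nums_this = ''
-- 		for ch in chsq:
-- 			tmp_chord = str(ord(ch))
-- 			tmp_chord = ('0'*(i_block_width-len(tmp_chord)))+tmp_chord
-- 			nums_this += tmp_chord
-- 		m_nums.append(int(nums_this))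
-- 	return m_nums
-- ===== SOURCE B (Python) =====
-- def ascii_to_nums_nomod(s, s_block_width):
--     out = []
--     block = 0
--     count = 0
--     for c in s:
--         o = ord(c)
--         d = 1000
--         while d <= o:
--             d *= 10
--         block = block * d + o
--         count += 1
--         if count == s_block_width:
--             out.append(block)
--             block = 0
--             count = 0
--     if count:
--         out.append(block)
--     return out
-- ===== Notes on version B (the rewrite author's own statement) =====
-- stated objective: alternative
-- what changed: Replaces A's string machinery (zero-pad each ord into a 3-char string, concatenate per chunk, re-parse with int()) by a single pass of pure integer arithmetic: a running block accumulator multiplied by each code's digit weight (1000, grown while it is <= ord) and flushed every s_block_width characters; no strings are ever built.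
-- outside the precondition, e.g. on ascii_to_nums_nomod('ab', -1): A returns [], B returns [97098]; on ascii_to_nums_nomod('ab', 0): A raises ValueError, B returns [97098]
import Mathlib
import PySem

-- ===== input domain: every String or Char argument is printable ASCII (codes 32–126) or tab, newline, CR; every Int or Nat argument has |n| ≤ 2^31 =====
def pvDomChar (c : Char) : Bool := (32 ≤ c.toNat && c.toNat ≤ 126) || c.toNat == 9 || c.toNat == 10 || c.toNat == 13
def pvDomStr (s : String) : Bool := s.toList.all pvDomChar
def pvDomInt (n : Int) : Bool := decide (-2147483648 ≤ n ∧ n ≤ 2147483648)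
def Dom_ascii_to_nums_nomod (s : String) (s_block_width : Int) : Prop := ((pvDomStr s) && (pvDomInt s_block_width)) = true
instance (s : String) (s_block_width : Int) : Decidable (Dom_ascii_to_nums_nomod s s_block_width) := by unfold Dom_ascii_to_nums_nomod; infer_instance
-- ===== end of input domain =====

-- B replaces A's string building (zero-pad each ord, concatenate, int()) by a single pass of pure
-- integer arithmetic: one running block accumulator multiplied by the code's digit weight, flushed
-- every s_block_width characters; no strings are ever formed.

-- ===== PORT A =====
-- int(nums_this) hand-ported: nums_this is always a nonempty string of ASCII decimal digits
-- (concatenation of zero-padded str(ord(ch)) codes over a nonempty chunk), and on exactly those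
-- strings this parser is int(); it returns none elsewhere (unreachable here).
def pvIntOfDigits? (cs : List Char) : Option Int :=
  if cs ≠ [] ∧ cs.all Char.isDigit
  then some (cs.foldl (fun n c => n * 10 + ((c.toNat : Int) - 48)) 0)
  else none

def ascii_to_nums_nomod (s : String) (s_block_width : Int) : List Int :=
  let cs := s.toList
  -- [s[i:i+s_block_width] for i in range(0, len(s), s_block_width)]
  let chunks := (PySem.List.pyRange 0 (cs.length : Int) s_block_width).map
    (fun i => PySem.List.slice cs (some i) (some (i + s_block_width)))
  chunks.foldl (fun m_nums chsq =>
    let nums_this := chsq.foldl (fun acc ch =>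
      let tmp_chord := PySem.Int.toChars (ch.toNat : Int)
      let tmp_chord := (List.replicate (3 - tmp_chord.length) '0') ++ tmp_chord
      acc ++ tmp_chord) ([] : List Char)
    m_nums ++ [(pvIntOfDigits? nums_this).getD 0]) []

-- ===== PORT B =====
-- while d <= o: d *= 10   (the '1 ≤ d' conjunct is only a termination guard: d starts at 1000 and grows)
def pvGrow (o : Int) (d : Int) : Int :=
  if h : d ≤ o ∧ 1 ≤ d then pvGrow o (d * 10) else d
termination_by (o + 1 - d).toNat
decreasing_by omega

def ascii_to_nums_nomod_alt (s : String) (s_block_width : Int) : List Int :=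
  -- state: (out, block, count)
  let fin := s.toList.foldl (fun (st : List Int × Int × Int) c =>
    let o : Int := c.toNat
    let d := pvGrow o 1000
    let block := st.2.1 * d + o
    let count := st.2.2 + 1
    if count = s_block_width then (st.1 ++ [block], 0, 0) else (st.1, block, count))
    ([], 0, 0)
  if fin.2.2 ≠ 0 then fin.1 ++ [fin.2.1] else fin.1

-- ===== PRECONDITION & SPEC =====
-- Pre_ restricts to the natural domain of positive block widths: width 0 makes A raise ValueError
-- (range() with zero step), and a negative width is a degenerate block size outside the task's
-- natural domain, on which A's range() happens to yield no chunks at all.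
def Pre_ascii_to_nums_nomod (s : String) (s_block_width : Int) : Prop := 1 ≤ s_block_width
instance (s : String) (s_block_width : Int) : Decidable (Pre_ascii_to_nums_nomod s s_block_width) := by unfold Pre_ascii_to_nums_nomod; infer_instance
def pvWitness_ascii_to_nums_nomod : String × Int := ("abc", 2)

def Spec_ascii_to_nums_nomod (s : String) (s_block_width : Int) (out : List Int) : Prop := out = ascii_to_nums_nomod_alt s s_block_width
instance (s : String) (s_block_width : Int) (out : List Int) : Decidable (Spec_ascii_to_nums_nomod s s_block_width out) := by unfold Spec_ascii_to_nums_nomod; infer_instance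

-- ===== CLAIM (what is proved, stated in full; the proofs are below) =====
def Claim_equal_ascii_to_nums_nomod : Prop := ∀ (s : String) (s_block_width : Int), Dom_ascii_to_nums_nomod s s_block_width → Pre_ascii_to_nums_nomod s s_block_width → Spec_ascii_to_nums_nomod s s_block_width (ascii_to_nums_nomod s s_block_width)

-- ===== LEMMAS AND PROOFS =====

-- the zero-padded decimal code of one character, and its numeric ingredients
def pvOrd (c : Char) : Int := (c.toNat : Int)

def pvCode (c : Char) : List Char :=
  let t := PySem.Int.toChars (pvOrd c)
  List.replicate (3 - t.length) '0' ++ t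

def pvCodeN (o : Nat) : List Char :=
  let t := PySem.Int.toChars (o : Int)
  List.replicate (3 - t.length) '0' ++ t

def pvDStep (n : Int) (c : Char) : Int := n * 10 + ((c.toNat : Int) - 48)

def pvParse (cs : List Char) (n : Int) : Int := cs.foldl pvDStep n

def pvBlock (n : Int) (l : List Char) : Int := l.foldl (fun m c => m * 1000 + pvOrd c) n

-- consecutive chunks of size k (k > 0)
def pvChunks (k : Nat) (l : List Char) : List (List Char) :=
  if h : l = [] ∨ k = 0 then [] else l.take k :: pvChunks k (l.drop k)
termination_by l.length
decreasing_by
  push_neg at h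
  have := List.length_pos_of_ne_nil h.1
  simp [List.length_drop]; omega

-- B's fold body, named for the proofs (definitionally the lambda in ascii_to_nums_nomod_alt)
def pvStep (w : Int) (st : List Int × Int × Int) (c : Char) : List Int × Int × Int :=
  let o : Int := c.toNat
  let d := pvGrow o 1000
  let block := st.2.1 * d + o
  let count := st.2.2 + 1
  if count = w then (st.1 ++ [block], 0, 0) else (st.1, block, count)

theorem pvCode_eq (c : Char) : pvCode c = pvCodeN c.toNat := rfl

theorem pvGrow_small {o : Int} (h : o < 1000) : pvGrow o 1000 = 1000 := by
  rw [pvGrow]; simp; omega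

-- 127 kernel evaluations: shape, digitness and value of each padded code
theorem pvCodeN_spec : ∀ o : Nat, o < 127 →
    (pvCodeN o).length = 3 ∧ (pvCodeN o).all Char.isDigit = true ∧ pvParse (pvCodeN o) 0 = (o : Int) := by
  decide

theorem pvParse_append (xs ys : List Char) (n : Int) :
    pvParse (xs ++ ys) n = pvParse ys (pvParse xs n) := by
  simp [pvParse, List.foldl_append]

theorem pvParse_shift (cs : List Char) : ∀ n : Int, pvParse cs n = pvParse cs 0 + n * 10 ^ cs.length := by
  induction cs with
  | nil => intro n; simp [pvParse]
  | cons c cs ih =>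
    intro n
    show pvParse cs (pvDStep n c) = pvParse cs (pvDStep 0 c) + n * 10 ^ (c :: cs).length
    rw [ih (pvDStep n c), ih (pvDStep 0 c)]
    simp [pvDStep, pow_succ]; ring

theorem pvParse_code (c : Char) (hc : c.toNat < 127) (rest : List Char) (n : Int) :
    pvParse (pvCode c ++ rest) n = pvParse rest (n * 1000 + pvOrd c) := by
  rw [pvParse_append]
  obtain ⟨hl, -, hv⟩ := pvCodeN_spec c.toNat hc
  rw [pvCode_eq, pvParse_shift (pvCodeN c.toNat) n, hv, hl]
  norm_num [pvOrd, add_comm]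

theorem pvParse_flatten (l : List Char) (hall : ∀ c ∈ l, c.toNat < 127) :
    ∀ n : Int, pvParse ((l.map pvCode).flatten) n = pvBlock n l := by
  induction l with
  | nil => intro n; simp [pvParse, pvBlock]
  | cons c l ih =>
    intro n
    have hc : c.toNat < 127 := hall c (by simp)
    simp only [List.map_cons, List.flatten_cons]
    rw [pvParse_code c hc _ n]
    rw [ih (fun x hx => hall x (by simp [hx]))]
    rfl

theorem pvInt_flatten (l : List Char) (hne : l ≠ []) (hall : ∀ c ∈ l, c.toNat < 127) :
    pvIntOfDigits? ((l.map pvCode).flatten) = some (pvBlock 0 l) := by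
  obtain ⟨c, l', rfl⟩ := List.exists_cons_of_ne_nil hne
  have hc := pvCodeN_spec c.toNat (hall c (by simp))
  have hflat_ne : ((c :: l').map pvCode).flatten ≠ [] := by
    simp only [List.map_cons, List.flatten_cons]
    intro h
    have h3 : (pvCode c).length = 3 := by rw [pvCode_eq]; exact hc.1
    have := congrArg List.length h
    simp [h3] at this
  have hdig : (((c :: l').map pvCode).flatten).all Char.isDigit = true := by
    simp only [List.all_eq_true, List.mem_flatten, List.mem_map]
    rintro x ⟨_, ⟨ch, hch, rfl⟩, hx⟩
    have := (pvCodeN_spec ch.toNat (hall ch hch)).2.1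
    rw [pvCode_eq] at hx
    exact (List.all_eq_true.mp this) x hx
  unfold pvIntOfDigits?
  rw [if_pos ⟨hflat_ne, hdig⟩]
  congr 1
  exact pvParse_flatten (c :: l') hall 0

theorem pv_foldl_snoc_map {α β : Type} (f : α → β) (l : List α) (acc : List β) :
    l.foldl (fun m x => m ++ [f x]) acc = acc ++ l.map f := by
  induction l generalizing acc with
  | nil => simp
  | cons h t ih => simp [List.foldl_cons, ih]

theorem pv_foldl_append_flatten {α : Type} (f : α → List Char) (l : List α) (acc : List Char) :
    l.foldl (fun a c => a ++ f c) acc = acc ++ (l.map f).flatten := by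
  induction l generalizing acc with
  | nil => simp
  | cons h t ih => simp [List.foldl_cons, ih]

-- range(a, b, w) for 0 < w, a < b: peel off the first index
theorem pv_pyRange_cons (a b w : Int) (hw : 0 < w) (hab : a < b) :
    PySem.List.pyRange a b w = a :: PySem.List.pyRange (a + w) b w := by
  rw [PySem.List.pyRange_of_pos _ _ hw, PySem.List.pyRange_of_pos _ _ hw]
  have h1 : (if a < b then ((b - a + w - 1) / w).toNat else 0)
      = (if a + w < b then ((b - (a + w) + w - 1) / w).toNat else 0) + 1 := by
    rw [if_pos hab]
    by_cases h2 : a + w < b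
    · rw [if_pos h2]
      have e1 : b - a + w - 1 = (b - (a + w) + w - 1) + 1 * w := by ring
      rw [e1, Int.add_mul_ediv_right _ _ (by omega : w ≠ 0)]
      have : 0 ≤ (b - (a + w) + w - 1) / w := Int.ediv_nonneg (by omega) (by omega)
      omega
    · rw [if_neg h2]
      have e1 : b - a + w - 1 = (b - a - 1) + 1 * w := by ring
      rw [e1, Int.add_mul_ediv_right _ _ (by omega : w ≠ 0)]
      have : (b - a - 1) / w = 0 := Int.ediv_eq_zero_of_lt (by omega) (by omega)
      omega
  rw [h1, List.range_succ_eq_map]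
  simp only [List.map_cons, List.map_map]
  congr 1
  · simp
  · apply List.map_congr_left
    intro k _
    simp [Function.comp, Nat.succ_eq_add_one]
    push_cast
    ring

theorem pv_pyRange_nil (a b w : Int) (hw : 0 < w) (hab : b ≤ a) :
    PySem.List.pyRange a b w = [] := by
  rw [PySem.List.pyRange_of_pos _ _ hw, if_neg (by omega)]
  simp

theorem pv_pyRange_shift (b w : Int) (hw : 0 < w) :
    PySem.List.pyRange w b w = (PySem.List.pyRange 0 (b - w) w).map (· + w) := by
  rw [PySem.List.pyRange_of_pos _ _ hw, PySem.List.pyRange_of_pos _ _ hw, List.map_map]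
  have hc : (if w < b then ((b - w + w - 1) / w).toNat else 0)
      = (if 0 < b - w then ((b - w - 0 + w - 1) / w).toNat else 0) := by
    by_cases h : w < b
    · rw [if_pos h, if_pos (by omega)]
      congr 2
      ring
    · rw [if_neg h, if_neg (by omega)]
  rw [hc]
  apply List.map_congr_left
  intro k _
  simp [Function.comp]
  ring

-- A's chunk driver equals pvChunks
theorem pv_drive (w : Int) (hw : 1 ≤ w) (cs : List Char) :
    (PySem.List.pyRange 0 (cs.length : Int) w).map
      (fun i => PySem.List.slice cs (some i) (some (i + w))) = pvChunks w.toNat cs := by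
  by_cases hcs : cs = []
  · subst hcs
    rw [pv_pyRange_nil _ _ _ (by omega) (by simp), pvChunks]
    simp
  · have hlen : 0 < cs.length := List.length_pos_of_ne_nil hcs
    rw [pv_pyRange_cons 0 _ w (by omega) (by exact_mod_cast hlen)]
    rw [pvChunks, dif_neg (by push_neg; exact ⟨hcs, by omega⟩)]
    simp only [List.map_cons, zero_add]
    congr 1
    · rw [PySem.List.slice_zero_start, PySem.List.slice_to _ (by omega)]
    · by_cases h2 : w ≤ (cs.length : Int)
      · have hdl : ((cs.drop w.toNat).length : Int) = (cs.length : Int) - w := by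
          simp [List.length_drop]; omega
        rw [pv_pyRange_shift _ _ (by omega), List.map_map]
        have : ∀ i ∈ PySem.List.pyRange 0 ((cs.length : Int) - w) w,
            ((fun i => PySem.List.slice cs (some i) (some (i + w))) ∘ (· + w)) i
              = PySem.List.slice (cs.drop w.toNat) (some i) (some (i + w)) := by
          intro i hi
          have hi0 : 0 ≤ i := ((PySem.List.mem_pyRange_iff_of_pos (by omega) i).mp hi).1
          simp only [Function.comp]
          rw [PySem.List.slice_toNat _ (by omega) (by omega),
              PySem.List.slice_toNat _ (by omega) (by omega), List.drop_drop]
          have e1 : (i + w).toNat = i.toNat + w.toNat := by omega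
          have e2 : (i + w + w).toNat - (i + w).toNat = (i + w).toNat - i.toNat := by omega
          rw [e2, e1, Nat.add_comm]
        rw [List.map_congr_left this, ← hdl]
        exact pv_drive w hw (cs.drop w.toNat)
      · rw [pv_pyRange_nil _ _ _ (by omega) (by omega)]
        have : cs.drop w.toNat = [] := List.drop_eq_nil_of_le (by omega)
        rw [this, pvChunks]
        simp
termination_by cs.length
decreasing_by
  have : 0 < w.toNat := by omega
  simp [List.length_drop]; omega

-- every chunk is nonempty and drawn from the original characters
theorem pv_chunks_mem (k : Nat) (l : List Char) :
    ∀ ch ∈ pvChunks k l, ch ≠ [] ∧ ∀ c ∈ ch, c ∈ l := by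
  intro ch hch
  rw [pvChunks] at hch
  by_cases h : l = [] ∨ k = 0
  · rw [dif_pos h] at hch
    simp at hch
  · rw [dif_neg h] at hch
    push_neg at h
    rcases List.mem_cons.mp hch with h1 | h1
    · subst h1
      constructor
      · simp only [ne_eq, List.take_eq_nil_iff, not_or]
        exact ⟨h.2, h.1⟩
      · intro c hc; exact List.mem_of_mem_take hc
    · obtain ⟨hne, hmem⟩ := pv_chunks_mem k (l.drop k) ch h1
      exact ⟨hne, fun c hc => List.mem_of_mem_drop (hmem c hc)⟩
termination_by l.length
decreasing_by
  rename_i h _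
  push_neg at h
  have := List.length_pos_of_ne_nil h.1
  simp [List.length_drop]; omega

def pvFin (st : List Int × Int × Int) : List Int :=
  if st.2.2 ≠ 0 then st.1 ++ [st.2.1] else st.1

theorem pv_alt_eq (s : String) (w : Int) :
    ascii_to_nums_nomod_alt s w = pvFin (s.toList.foldl (pvStep w) ([], 0, 0)) := rfl

-- B's fold: processing l with r slots left in the current block
theorem pv_M2 (w : Int) (l : List Char) (hall : ∀ c ∈ l, c.toNat < 1000) :
    ∀ (r : Nat), 0 < r → (r : Int) ≤ w → ∀ (out : List Int) (b : Int),
      l.foldl (pvStep w) (out, b, w - r) =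
        if l.length < r then (out, pvBlock b l, w - r + l.length)
        else (l.drop r).foldl (pvStep w) (out ++ [pvBlock b (l.take r)], 0, 0) := by
  induction l with
  | nil =>
    intro r hr hrw out b
    rw [if_pos (by simpa using hr)]
    simp [pvBlock]
  | cons c l ih =>
    intro r hr hrw out b
    have hc : (c.toNat : Int) < 1000 := by exact_mod_cast hall c (by simp)
    have hall' : ∀ x ∈ l, x.toNat < 1000 := fun x hx => hall x (by simp [hx])
    have hstep : pvStep w (out, b, w - r) c =
        if w - r + 1 = w then (out ++ [b * 1000 + pvOrd c], 0, 0)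
        else (out, b * 1000 + pvOrd c, w - r + 1) := by
      simp only [pvStep]
      rw [pvGrow_small hc]
      rfl
    by_cases hr1 : r = 1
    · subst hr1
      rw [List.foldl_cons, hstep, if_pos (by push_cast; ring)]
      rw [if_neg (by simp)]
      simp [pvBlock]
    · have hrr : r = (r - 1) + 1 := by omega
      rw [List.foldl_cons, hstep, if_neg (by omega)]
      have e1 : w - r + 1 = w - ((r - 1 : Nat) : Int) := by omega
      rw [e1, ih hall' (r - 1) (by omega) (by omega) out (b * 1000 + pvOrd c)]
      have e2 : (c :: l).drop r = l.drop (r - 1) := by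
        conv_lhs => rw [hrr]
        rw [List.drop_succ_cons]
      have e3 : (c :: l).take r = c :: l.take (r - 1) := by
        conv_lhs => rw [hrr]
        rw [List.take_succ_cons]
      by_cases hlt : l.length < r - 1
      · rw [if_pos hlt, if_pos (by simp; omega)]
        have ecount : w - ((r - 1 : Nat) : Int) + (l.length : Int)
            = w - (r : Int) + (((c :: l).length : Nat) : Int) := by
          simp only [List.length_cons]
          push_cast
          omega
        rw [← ecount]
        rfl
      · rw [if_neg hlt, if_neg (by simp; omega)]
        rw [e2, e3]
        rfl

theorem pv_Bmain (w : Int) (hw : 1 ≤ w) (cs : List Char)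
    (hall : ∀ c ∈ cs, c.toNat < 1000) (out : List Int) :
    pvFin (cs.foldl (pvStep w) (out, 0, 0)) = out ++ (pvChunks w.toNat cs).map (pvBlock 0) := by
  have hM := pv_M2 w cs hall w.toNat (by omega) (by omega) out 0
  rw [show w - ((w.toNat : Nat) : Int) = 0 by omega] at hM
  by_cases hl : cs.length < w.toNat
  · rw [if_pos hl] at hM
    rw [hM]
    by_cases hnil : cs = []
    · subst hnil
      rw [pvChunks]
      simp [pvFin]
    · have hlp : 0 < cs.length := List.length_pos_of_ne_nil hnil
      have hdrop : cs.drop w.toNat = [] := List.drop_eq_nil_of_le (by omega)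
      have htake : cs.take w.toNat = cs := List.take_of_length_le (by omega)
      have hnilch : pvChunks w.toNat ([] : List Char) = [] := by rw [pvChunks]; simp
      have hch : pvChunks w.toNat cs = [cs] := by
        rw [pvChunks, dif_neg (by push_neg; exact ⟨hnil, by omega⟩), hdrop, htake, hnilch]
      rw [hch]
      unfold pvFin
      rw [if_pos (show (0 : Int) + (cs.length : Int) ≠ 0 by omega)]
      simp
  · rw [if_neg hl] at hM
    rw [hM]
    rw [pv_Bmain w hw (cs.drop w.toNat) (fun c hc => hall c (List.mem_of_mem_drop hc))
        (out ++ [pvBlock 0 (cs.take w.toNat)])]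
    have hnil : cs ≠ [] := by
      intro h; subst h; simp at hl; omega
    have hch : pvChunks w.toNat cs = cs.take w.toNat :: pvChunks w.toNat (cs.drop w.toNat) := by
      rw [pvChunks, dif_neg (by push_neg; exact ⟨hnil, by omega⟩)]
    rw [hch]
    simp [List.append_assoc]
termination_by cs.length
decreasing_by
  have hlp : 0 < cs.length := by
    by_contra h
    have : cs.length = 0 := by omega
    simp [this] at hl
    omega
  simp [List.length_drop]; omega

theorem pv_Amain (s : String) (w : Int) (hw : 1 ≤ w)
    (hall : ∀ c ∈ s.toList, c.toNat < 127) :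
    ascii_to_nums_nomod s w = (pvChunks w.toNat s.toList).map (pvBlock 0) := by
  have h0 : ascii_to_nums_nomod s w
      = ((PySem.List.pyRange 0 (s.toList.length : Int) w).map
          (fun i => PySem.List.slice s.toList (some i) (some (i + w)))).foldl
          (fun m chsq =>
            m ++ [(pvIntOfDigits? (chsq.foldl (fun acc ch => acc ++ pvCode ch) [])).getD 0]) [] := rfl
  rw [h0, pv_drive w hw s.toList, pv_foldl_snoc_map]
  simp only [List.nil_append]
  apply List.map_congr_left
  intro ch hch
  obtain ⟨hne, hmem⟩ := pv_chunks_mem w.toNat s.toList ch hch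
  rw [pv_foldl_append_flatten pvCode ch []]
  simp only [List.nil_append]
  rw [pvInt_flatten ch hne (fun c hc => hall c (hmem c hc))]
  rfl

-- ===== VERDICT (by name: the statement is the Claim_ definition above) =====
theorem ascii_to_nums_nomod_spec : Claim_equal_ascii_to_nums_nomod := by
  intro s w hdom hpre
  unfold Spec_ascii_to_nums_nomod
  have hall : ∀ c ∈ s.toList, c.toNat < 127 := by
    unfold Dom_ascii_to_nums_nomod at hdom
    have h1 : pvDomStr s = true := by
      simp only [Bool.and_eq_true] at hdom
      exact hdom.1
    intro c hc
    have h2 := (List.all_eq_true.mp h1) c hc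
    unfold pvDomChar at h2
    simp at h2
    omega
  have hw : 1 ≤ w := hpre
  rw [pv_Amain s w hw hall, pv_alt_eq,
      pv_Bmain w hw s.toList (fun c hc => by have := hall c hc; omega) []]
  simp
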